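-- pv_equiv track=rewrite | github.com/benzsevern/infermap | infermap/scorers/initialism.py | _is_prefix_concat
-- ===== SOURCE A (Python) =====
-- def _is_prefix_concat(target: str, source_tokens: list[str]) -> bool:
--     """Is *target* a concatenation of non-empty prefixes of *source_tokens*
--     (in order), using every source token exactly once?
--
--     Each source token must contribute at least 1 character. DP search.
--     """
--     target = target.lower()
--     n_src = len(source_tokens)
--     n_tgt = len(target)
--     if n_src == 0 or n_tgt == 0:
--         return False
--
--     # dp[i][j] = can we consume target[0:j] using source_tokens[0:i]?
--     dp = [[False] * (n_tgt + 1) for _ in range(n_src + 1)]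
--     dp[0][0] = True
--     for i in range(1, n_src + 1):
--         tok = source_tokens[i - 1]
--         for j in range(1, n_tgt + 1):
--             # Try each prefix length k of this token (>=1)
--             for k in range(1, min(len(tok), j) + 1):
--                 if target[j - k : j] == tok[:k] and dp[i - 1][j - k]:
--                     dp[i][j] = True
--                     break
--     return dp[n_src][n_tgt]
-- ===== SOURCE B (Python) =====
-- def _is_prefix_concat(target: str, source_tokens: list[str]) -> bool:
--     """Forward reachability: for each token, from every reachable split point j
--     compute the longest common prefix of the token with target[j:] once, then
--     mark all positions j+1 .. j+lcp reachable.  One LCP scan replaces A's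
--     per-(j,k) slice comparisons."""
--     t = target.lower()
--     n = len(t)
--     if not source_tokens or n == 0:
--         return False
--     reach = [True] + [False] * n
--     for tok in source_tokens:
--         new = [False] * (n + 1)
--         for j in range(n + 1):
--             if reach[j]:
--                 m = 0
--                 while m < len(tok) and j + m < n and tok[m] == t[j + m]:
--                     m += 1
--                 for e in range(j + 1, j + m + 1):
--                     new[e] = True
--         reach = new
--     return reach[n]
-- ===== Notes on version B (the rewrite author's own statement) =====
-- stated objective: faster
-- what changed: Replaced the backward 3-level DP (which re-compares a target slice with a token prefix for every prefix length k at every cell) by forward reachability: per token, one longest-common-prefix scan of the token against target[j:] at each reachable split point j, then marking the interval j+1..j+lcp reachable.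
import Mathlib
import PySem

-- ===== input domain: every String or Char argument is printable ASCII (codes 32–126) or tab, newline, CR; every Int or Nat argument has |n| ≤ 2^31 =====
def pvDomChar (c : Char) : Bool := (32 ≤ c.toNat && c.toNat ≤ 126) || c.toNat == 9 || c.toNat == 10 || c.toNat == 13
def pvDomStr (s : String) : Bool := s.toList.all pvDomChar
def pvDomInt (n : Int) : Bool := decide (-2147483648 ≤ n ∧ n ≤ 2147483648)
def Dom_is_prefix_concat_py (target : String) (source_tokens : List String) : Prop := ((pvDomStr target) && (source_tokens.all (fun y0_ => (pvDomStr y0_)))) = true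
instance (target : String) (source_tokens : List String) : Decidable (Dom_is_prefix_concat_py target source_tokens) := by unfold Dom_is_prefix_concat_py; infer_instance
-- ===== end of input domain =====

-- B replaces A's backward 3-level DP by forward reachability with one LCP scan
-- per (token, reachable position) and interval marking; measured faster.

-- ===== PORT A =====
-- inner `for k in range(1, min(len(tok), j)+1): … break` — first success sets the cell, i.e. `any`;
-- target[j-k:j] / tok[:k] are drop/take (indices are natural and in range here: 0 ≤ j-k, j ≤ len(t)).
def pvInnerA (t tok : List Char) (prev : List Bool) (j : Nat) : Bool :=
  (List.range' 1 (min tok.length j)).any fun k =>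
    ((t.drop (j - k)).take k == tok.take k) && prev.getD (j - k) false

-- the `for j in range(1, n_tgt+1)` loop filling row i in place (init = the table's row i)
def pvStepA (t tok : List Char) (prev init : List Bool) : List Bool :=
  (List.range' 1 t.length).foldl (fun row j => row.set j (pvInnerA t tok prev j)) init

def is_prefix_concat_py (target : String) (source_tokens : List String) : Bool :=
  let t := (PySem.Str.lower target).toList
  let n_src := source_tokens.length
  let n_tgt := t.length
  if n_src = 0 || n_tgt = 0 then false
  else
    let dp0 : List (List Bool) := List.replicate (n_src + 1) (List.replicate (n_tgt + 1) false)
    let dp0 := dp0.set 0 ((dp0.getD 0 []).set 0 true)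
    let dp := (List.range' 1 n_src).foldl (fun dp i =>
        dp.set i (pvStepA t (source_tokens.getD (i - 1) "").toList
          (dp.getD (i - 1) []) (dp.getD i []))) dp0
    (dp.getD n_src []).getD n_tgt false

-- ===== PORT B =====
-- the `while m < len(tok) and j+m < n and tok[m] == t[j+m]: m += 1` loop
def pvLcp (tok t : List Char) (j m : Nat) : Nat :=
  if h : m < tok.length ∧ j + m < t.length ∧ tok.getD m ' ' = t.getD (j + m) ' ' then
    pvLcp tok t j (m + 1)
  else m
termination_by tok.length - m
decreasing_by omega

-- `for e in range(j+1, j+m+1): new[e] = True` (all indices natural and in range)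
def pvMark (nw : List Bool) (j m : Nat) : List Bool :=
  (List.range' (j + 1) m).foldl (fun l e => l.set e true) nw

-- body of `for tok in source_tokens`
def pvStepB (t tok : List Char) (reach : List Bool) : List Bool :=
  (List.range (t.length + 1)).foldl (fun nw j =>
    if reach.getD j false then pvMark nw j (pvLcp tok t j 0) else nw)
    (List.replicate (t.length + 1) false)

def is_prefix_concat_py_alt (target : String) (source_tokens : List String) : Bool :=
  let t := (PySem.Str.lower target).toList
  let n := t.length
  if source_tokens = [] || n = 0 then false
  else
    let reach := true :: List.replicate n false
    let reach := source_tokens.foldl (fun reach tokS => pvStepB t tokS.toList reach) reach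
    reach.getD n false

-- ===== PRECONDITION & SPEC =====
def Spec_is_prefix_concat_py (target : String) (source_tokens : List String) (out : Bool) : Prop := out = is_prefix_concat_py_alt target source_tokens
instance (target : String) (source_tokens : List String) (out : Bool) : Decidable (Spec_is_prefix_concat_py target source_tokens out) := by unfold Spec_is_prefix_concat_py; infer_instance

-- ===== CLAIM (what is proved, stated in full; the proofs are below) =====
def Claim_equal_is_prefix_concat_py : Prop := ∀ (target : String) (source_tokens : List String), Dom_is_prefix_concat_py target source_tokens → Spec_is_prefix_concat_py target source_tokens (is_prefix_concat_py target source_tokens)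

-- ===== LEMMAS AND PROOFS =====


theorem pvFoldl_set_length (js : List Nat) (f : Nat → Bool) (init : List Bool) :
    (js.foldl (fun row j => row.set j (f j)) init).length = init.length := by
  induction js generalizing init with
  | nil => rfl
  | cons j js ih => simp [List.foldl_cons, ih]

theorem pvGetD_foldl_set (js : List Nat) (f : Nat → Bool) (init : List Bool) (p : Nat) :
    ((js.foldl (fun row j => row.set j (f j)) init).getD p false) =
      if p ∈ js ∧ p < init.length then f p else init.getD p false := by
  induction js generalizing init with
  | nil => simp
  | cons j js ih =>
    rw [List.foldl_cons, ih]
    simp only [List.length_set, List.mem_cons]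
    by_cases hmem : p ∈ js
    · by_cases hl : p < init.length
      · simp [hmem, hl]
      · simp only [hmem, hl, and_false, and_true, if_false, if_true, or_true,
          List.getD_eq_getElem?_getD, List.getElem?_eq_none (by simpa using not_lt.mp hl : init.length ≤ p),
          List.getElem?_eq_none (by simpa using not_lt.mp hl : (init.set j (f j)).length ≤ p)]
    · by_cases hpj : p = j
      · subst hpj
        by_cases hl : p < init.length
        · simp [hmem, hl, List.getD_eq_getElem?_getD, List.getElem?_set, hl]
        · simp only [hmem, hl, and_false, or_false, and_true, if_false, eq_self_iff_true, true_or,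
            List.getD_eq_getElem?_getD,
            List.getElem?_eq_none (by simpa using not_lt.mp hl : init.length ≤ p),
            List.getElem?_eq_none (by simpa using not_lt.mp hl : (init.set p (f p)).length ≤ p)]
      · simp [hmem, hpj, List.getD_eq_getElem?_getD, List.getElem?_set, Ne.symm hpj]


theorem pvMark_length (nw : List Bool) (j m : Nat) : (pvMark nw j m).length = nw.length :=
  pvFoldl_set_length (List.range' (j + 1) m) (fun _ => true) nw

theorem pvGetD_mark (nw : List Bool) (j m p : Nat) :
    (pvMark nw j m).getD p false =
      (nw.getD p false || (decide (j + 1 ≤ p) && decide (p < j + 1 + m) && decide (p < nw.length))) := by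
  rw [pvMark, pvGetD_foldl_set (f := fun _ => true)]
  simp only [List.mem_range'_1]
  by_cases h1 : j + 1 ≤ p ∧ p < j + 1 + m
  · by_cases h2 : p < nw.length
    · simp [h1.1, h1.2, h2]
    · simp [h1, h2]
  · rw [if_neg (by tauto)]
    rcases not_and_or.mp h1 with h | h <;> simp [h]

theorem pvGetD_foldl_mark (js : List Nat) (c : Nat → Bool) (m : Nat → Nat)
    (init : List Bool) (p : Nat) :
    ((js.foldl (fun nw j => if c j then pvMark nw j (m j) else nw) init).getD p false = true) ↔
      (init.getD p false = true ∨
        ∃ j ∈ js, c j = true ∧ j + 1 ≤ p ∧ p < j + 1 + m j ∧ p < init.length) := by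
  induction js generalizing init with
  | nil => simp
  | cons j js ih =>
    rw [List.foldl_cons]
    by_cases hc : c j = true
    · rw [if_pos hc, ih]
      simp only [pvGetD_mark, pvMark_length, List.mem_cons, Bool.or_eq_true,
        Bool.and_eq_true, decide_eq_true_eq]
      constructor
      · rintro ((h | ⟨h1, h2⟩) | ⟨j', hj', h⟩)
        · exact Or.inl h
        · exact Or.inr ⟨j, Or.inl rfl, hc, h1.1, h1.2, h2⟩
        · exact Or.inr ⟨j', Or.inr hj', h⟩
      · rintro (h | ⟨j', (rfl | hj'), h⟩)
        · exact Or.inl (Or.inl h)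
        · exact Or.inl (Or.inr ⟨⟨h.2.1, h.2.2.1⟩, h.2.2.2⟩)
        · exact Or.inr ⟨j', hj', h⟩
    · rw [if_neg hc, ih]
      simp only [List.mem_cons]
      constructor
      · rintro (h | ⟨j', hj', h⟩)
        · exact Or.inl h
        · exact Or.inr ⟨j', Or.inr hj', h⟩
      · rintro (h | ⟨j', (rfl | hj'), h⟩)
        · exact Or.inl h
        · exact absurd h.1 hc
        · exact Or.inr ⟨j', hj', h⟩

-- getD of pvStepB
theorem pvGetD_stepB (t tok : List Char) (reach : List Bool) (p : Nat) :
    (pvStepB t tok reach).getD p false = true ↔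
      ∃ j, j < t.length + 1 ∧ reach.getD j false = true ∧ j + 1 ≤ p ∧
        p < j + 1 + pvLcp tok t j 0 ∧ p < t.length + 1 := by
  rw [pvStepB, pvGetD_foldl_mark (c := fun j => reach.getD j false) (m := fun j => pvLcp tok t j 0)]
  simp [List.mem_range]

-- lcp characterization
theorem pvLcp_spec (tok t : List Char) (j m : Nat) :
    (m ≤ tok.length → pvLcp tok t j m ≤ tok.length) ∧
    (j + m ≤ t.length → j + pvLcp tok t j m ≤ t.length) ∧
    m ≤ pvLcp tok t j m ∧
    (∀ i, m ≤ i → i < pvLcp tok t j m → tok.getD i ' ' = t.getD (j + i) ' ') ∧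
    ¬(pvLcp tok t j m < tok.length ∧ j + pvLcp tok t j m < t.length ∧
        tok.getD (pvLcp tok t j m) ' ' = t.getD (j + pvLcp tok t j m) ' ') := by
  have main : ∀ (fuel m : Nat), tok.length - m ≤ fuel →
      ((m ≤ tok.length → pvLcp tok t j m ≤ tok.length) ∧
      (j + m ≤ t.length → j + pvLcp tok t j m ≤ t.length) ∧
      m ≤ pvLcp tok t j m ∧
      (∀ i, m ≤ i → i < pvLcp tok t j m → tok.getD i ' ' = t.getD (j + i) ' ') ∧
      ¬(pvLcp tok t j m < tok.length ∧ j + pvLcp tok t j m < t.length ∧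
          tok.getD (pvLcp tok t j m) ' ' = t.getD (j + pvLcp tok t j m) ' ')) := by
    intro fuel
    induction fuel with
    | zero =>
      intro m hm
      have hcond : ¬(m < tok.length ∧ j + m < t.length ∧ tok.getD m ' ' = t.getD (j + m) ' ') := by
        intro h; omega
      rw [pvLcp, dif_neg hcond]
      exact ⟨fun h => h, fun h => h, le_refl m, fun i h1 h2 => absurd h2 (by omega), hcond⟩
    | succ f ihf =>
      intro m hm
      by_cases hcond : m < tok.length ∧ j + m < t.length ∧ tok.getD m ' ' = t.getD (j + m) ' '
      · rw [pvLcp, dif_pos hcond]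
        obtain ⟨i1, i2, i3, i4, i5⟩ := ihf (m + 1) (by omega)
        refine ⟨fun _ => i1 (by omega), fun _ => i2 (by omega), by omega, ?_, i5⟩
        intro i h1 h2
        rcases Nat.eq_or_lt_of_le h1 with rfl | h1
        · exact hcond.2.2
        · exact i4 i h1 h2
      · rw [pvLcp, dif_neg hcond]
        exact ⟨fun h => h, fun h => h, le_refl m, fun i h1 h2 => absurd h2 (by omega), hcond⟩
  exact main (tok.length - m) m le_rfl

theorem pvLe_lcp_iff (tok t : List Char) (j k : Nat) (hj : j ≤ t.length) :
    k ≤ pvLcp tok t j 0 ↔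
      (k ≤ tok.length ∧ j + k ≤ t.length ∧ ∀ i, i < k → tok.getD i ' ' = t.getD (j + i) ' ') := by
  obtain ⟨hle, hle', hge, hmatch, hstop⟩ := pvLcp_spec tok t j 0
  constructor
  · intro hk
    exact ⟨le_trans hk (hle (Nat.zero_le _)), by have := hle' (by omega); omega,
      fun i hi => hmatch i (Nat.zero_le _) (lt_of_lt_of_le hi hk)⟩
  · rintro ⟨h1, h2, h3⟩
    by_contra hlt
    push_neg at hlt
    exact hstop ⟨by omega, by omega, h3 _ (by omega)⟩

theorem pvSlice_eq_iff (t tok : List Char) (j k : Nat) (hk : k ≤ tok.length) (hj : j + k ≤ t.length) :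
    ((t.drop j).take k = tok.take k) ↔ (∀ i, i < k → tok.getD i ' ' = t.getD (j + i) ' ') := by
  have lenA : ((t.drop j).take k).length = k := by simp; omega
  have lenB : (tok.take k).length = k := by simp; omega
  constructor
  · intro h i hi
    have e : ((t.drop j).take k)[i]'(by omega) = (tok.take k)[i]'(by omega) := by
      simp only [h]
    rw [List.getD_eq_getElem _ _ (by omega), List.getD_eq_getElem _ _ (by omega)]
    simpa [List.getElem_take, List.getElem_drop] using e.symm
  · intro h
    apply List.ext_getElem (by rw [lenA, lenB])
    intro i h1 h2
    have hi : i < k := by omega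
    have hh := h i hi
    rw [List.getD_eq_getElem _ _ (by omega), List.getD_eq_getElem _ _ (by omega)] at hh
    simpa [List.getElem_take, List.getElem_drop] using hh.symm

theorem pvFoldl_mark_length (js : List Nat) (c : Nat → Bool) (m : Nat → Nat) (init : List Bool) :
    (js.foldl (fun nw j => if c j then pvMark nw j (m j) else nw) init).length = init.length := by
  induction js generalizing init with
  | nil => rfl
  | cons j js ih =>
    rw [List.foldl_cons]
    by_cases hc : c j = true
    · rw [if_pos hc, ih, pvMark_length]
    · rw [if_neg hc, ih]

theorem pvStepB_length (t tok : List Char) (reach : List Bool) :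
    (pvStepB t tok reach).length = t.length + 1 := by
  rw [pvStepB, pvFoldl_mark_length]; simp

theorem pvGetD_replicate_false (n p : Nat) : (List.replicate n false).getD p false = false := by
  simp [List.getD_eq_getElem?_getD, List.getElem?_replicate]
  split <;> simp

theorem pvInnerA_iff (t tok : List Char) (prev : List Bool) (p : Nat) :
    pvInnerA t tok prev p = true ↔
      ∃ k, 1 ≤ k ∧ k ≤ min tok.length p ∧ ((t.drop (p - k)).take k = tok.take k) ∧
        prev.getD (p - k) false = true := by
  rw [pvInnerA, List.any_eq_true]
  constructor
  · rintro ⟨k, hk, h⟩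
    rw [List.mem_range'_1] at hk
    rw [Bool.and_eq_true, beq_iff_eq] at h
    exact ⟨k, hk.1, by omega, h.1, h.2⟩
  · rintro ⟨k, h1, h2, h3, h4⟩
    refine ⟨k, List.mem_range'_1.mpr ⟨h1, by omega⟩, ?_⟩
    rw [Bool.and_eq_true, beq_iff_eq]
    exact ⟨h3, h4⟩

theorem pvStep_eq (t tok : List Char) (prev : List Bool) :
    pvStepA t tok prev (List.replicate (t.length + 1) false) = pvStepB t tok prev := by
  have lenA : (pvStepA t tok prev (List.replicate (t.length + 1) false)).length = t.length + 1 := by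
    rw [pvStepA, pvFoldl_set_length, List.length_replicate]
  apply List.ext_getElem (by rw [lenA, pvStepB_length])
  intro p h1 h2
  rw [← List.getD_eq_getElem _ false h1, ← List.getD_eq_getElem _ false h2]
  have hp : p < t.length + 1 := by rw [lenA] at h1; exact h1
  rw [pvStepA, pvGetD_foldl_set, pvGetD_replicate_false, List.length_replicate]
  rcases Bool.eq_false_or_eq_true ((pvStepB t tok prev).getD p false) with hB | hB <;> rw [hB]
  · -- stepB true at p: obtain j and build k
    obtain ⟨j, hj, hreach, hj1, hj2, -⟩ := (pvGetD_stepB t tok prev p).mp hB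
    have hjle : j ≤ t.length := by omega
    have hk := (pvLe_lcp_iff tok t j (p - j) hjle).mp (by omega)
    rw [if_pos ⟨List.mem_range'_1.mpr ⟨by omega, by omega⟩, hp⟩]
    apply (pvInnerA_iff t tok prev p).mpr
    have hpj : p - (p - j) = j := by omega
    refine ⟨p - j, by omega, by omega, ?_, ?_⟩
    · rw [hpj]
      exact (pvSlice_eq_iff t tok j (p - j) hk.1 hk.2.1).mpr hk.2.2
    · rw [hpj]; exact hreach
  · -- stepB false at p: the A-side ite must be false too
    by_cases hmem : p ∈ List.range' 1 t.length ∧ p < t.length + 1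
    · rw [if_pos hmem]
      by_contra hA
      rw [Bool.not_eq_false] at hA
      obtain ⟨k, hk1, hk2, hk3, hk4⟩ := (pvInnerA_iff t tok prev p).mp hA
      have hrange := List.mem_range'_1.mp hmem.1
      have hkp : k ≤ p := by omega
      have hjt : p - k ≤ t.length := by omega
      have hmatch := (pvSlice_eq_iff t tok (p - k) k (by omega) (by omega)).mp hk3
      have hlcp := (pvLe_lcp_iff tok t (p - k) k hjt).mpr ⟨by omega, by omega, hmatch⟩
      have hTrue := (pvGetD_stepB t tok prev p).mpr
        ⟨p - k, by omega, hk4, by omega, by omega, hp⟩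
      rw [hB] at hTrue
      exact absurd hTrue (by simp)
    · rw [if_neg hmem]

-- common list-set lemma
theorem pvGetD_set {α : Type} (l : List α) (i k : Nat) (v d : α) :
    (l.set i v).getD k d = if i = k ∧ i < l.length then v else l.getD k d := by
  by_cases h1 : i = k
  · subst h1
    by_cases h2 : i < l.length
    · simp [List.getD_eq_getElem?_getD, List.getElem?_set, h2]
    · simp only [h2, and_false, if_false, List.getD_eq_getElem?_getD,
        List.getElem?_eq_none (by simpa using not_lt.mp h2 : l.length ≤ i),
        List.getElem?_eq_none (by simpa using not_lt.mp h2 : (l.set i v).length ≤ i)]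
  · simp [List.getD_eq_getElem?_getD, List.getElem?_set, h1]

-- B's per-token iteration applied to a list of tokens
def pvRowsF (t : List Char) (toks : List String) (r0 : List Bool) : List Bool :=
  toks.foldl (fun r s => pvStepA t s.toList r (List.replicate (t.length + 1) false)) r0

theorem pvRowsF_eq_B (t : List Char) (toks : List String) (r0 : List Bool) :
    pvRowsF t toks r0 = toks.foldl (fun r s => pvStepB t s.toList r) r0 := by
  induction toks generalizing r0 with
  | nil => rfl
  | cons s toks ih => simp only [pvRowsF, List.foldl_cons, pvStep_eq]

-- invariant of A's outer loop over the dp table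
theorem pvAfold (t : List Char) (S : List String) (m : Nat) (hm : m ≤ S.length) :
    ((List.range' 1 m).foldl
        (fun dp i => dp.set i (pvStepA t ((S.getD (i - 1) "").toList)
          (dp.getD (i - 1) []) (dp.getD i [])))
        ((List.replicate (S.length + 1) (List.replicate (t.length + 1) false)).set 0
          ((List.replicate (t.length + 1) false).set 0 true))).length = S.length + 1 ∧
    ∀ k, k ≤ S.length →
      ((List.range' 1 m).foldl
        (fun dp i => dp.set i (pvStepA t ((S.getD (i - 1) "").toList)
          (dp.getD (i - 1) []) (dp.getD i [])))
        ((List.replicate (S.length + 1) (List.replicate (t.length + 1) false)).set 0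
          ((List.replicate (t.length + 1) false).set 0 true))).getD k [] =
        if k ≤ m then pvRowsF t (S.take k) ((List.replicate (t.length + 1) false).set 0 true)
        else List.replicate (t.length + 1) false := by
  induction m with
  | zero =>
    rw [List.range'_zero, List.foldl_nil]
    refine ⟨by simp, ?_⟩
    intro k hk
    rw [pvGetD_set]
    by_cases hk0 : k = 0
    · subst hk0
      simp [pvRowsF]
    · simp only [show ¬((0:Nat) = k ∧ 0 < (List.replicate (S.length + 1)
        (List.replicate (t.length + 1) false)).length) from fun h => hk0 h.1.symm, if_false,
        Nat.le_zero, hk0, if_false]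
      simp [List.getD_eq_getElem?_getD, List.getElem?_replicate, Nat.lt_succ_of_le hk]
  | succ m ih =>
    obtain ⟨ihl, ihg⟩ := ih (by omega)
    have hrc : List.range' 1 (m + 1) = List.range' 1 m ++ [1 + m] := by
      have := List.range'_concat (s := 1) (n := m) (step := 1)
      simpa using this
    rw [hrc, List.foldl_append, List.foldl_cons, List.foldl_nil]
    have hm1 : (1 + m) - 1 = m := by omega
    rw [hm1]
    have hrowm := ihg m (by omega)
    rw [if_pos (le_refl m)] at hrowm
    have hrowm1 := ihg (1 + m) (by omega)
    rw [if_neg (by omega)] at hrowm1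
    constructor
    · rw [List.length_set, ihl]
    · intro k hk
      rw [pvGetD_set, hrowm, hrowm1, ihl]
      by_cases hke : 1 + m = k
      · subst hke
        rw [if_pos ⟨rfl, by omega⟩, if_pos (by omega)]
        have htake : S.take (1 + m) = S.take m ++ [S[m]'(by omega)] := by
          rw [Nat.add_comm 1 m]
          rw [List.take_succ, List.getElem?_eq_getElem (by omega)]
          rfl
        rw [show S.getD m "" = S[m]'(by omega) from List.getD_eq_getElem S "" (by omega)]
        conv_rhs => rw [htake, pvRowsF, List.foldl_append, List.foldl_cons, List.foldl_nil]
        rfl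
      · rw [if_neg (fun h => hke h.1), ihg k hk]
        by_cases hkm : k ≤ m
        · rw [if_pos hkm, if_pos (by omega)]
        · rw [if_neg hkm, if_neg (by omega)]

-- ===== VERDICT (by name: the statement is the Claim_ definition above) =====
theorem is_prefix_concat_py_spec : Claim_equal_is_prefix_concat_py := by
  unfold Claim_equal_is_prefix_concat_py Spec_is_prefix_concat_py
  intro target S _
  simp only [is_prefix_concat_py, is_prefix_concat_py_alt, PySem.Str.toList_lower]
  by_cases ht : PySem.Chars.lower target.toList = []
  · simp [ht]
  · by_cases hS : S = []
    · simp [hS]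
    · have hSlen : S.length ≠ 0 := fun h => hS (List.length_eq_zero_iff.mp h)
      have hn : (PySem.Chars.lower target.toList).length ≠ 0 :=
        fun h => ht (List.length_eq_zero_iff.mp h)
      rw [if_neg (by simp [hSlen, hn]), if_neg (by simp [hS, hn])]
      have hdp0 : (List.replicate (S.length + 1)
          (List.replicate ((PySem.Chars.lower target.toList).length + 1) false)).getD 0 [] =
          List.replicate ((PySem.Chars.lower target.toList).length + 1) false := by
        rw [List.replicate_succ, List.getD_cons_zero]
      rw [hdp0]
      obtain ⟨-, hg⟩ := pvAfold (PySem.Chars.lower target.toList) S S.length le_rfl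
      rw [hg S.length le_rfl, if_pos le_rfl, List.take_length, pvRowsF_eq_B]
      rw [show (List.replicate ((PySem.Chars.lower target.toList).length + 1) false).set 0 true =
          true :: List.replicate (PySem.Chars.lower target.toList).length false from by
        rw [List.replicate_succ]; rfl]
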